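-- pv_equiv track=rewrite | github.com/szalai-istvan/apparat-heating-planner | scriptDiscovery.py | getFullHtmlContent
-- ===== SOURCE A (Python) =====
-- SRC = '$src'
--
-- SCRIPT_TAG_TEMPLATE = f'<script type="text/javascript" src="{SRC}"></script>'
--
-- DISCRIMINATOR_PATH_PART = 2
--
-- FOUR_SPACES = '    '
--
-- EMPTY_STRING = ''
--
-- P5 = 'p5'
--
-- def getFullHtmlContent(htmlContent, jsFiles):
--     lastDir = ''
--     rows = []
--     p5Rows = []
--
--     for jsFile in jsFiles:
--         directory = jsFile.split('/')[DISCRIMINATOR_PATH_PART]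
--         if directory != lastDir:
--             rows.append(EMPTY_STRING + '\n')
--         lastDir = directory
--
--         if P5 not in jsFile:
--             rows.append(FOUR_SPACES + createScriptTag(jsFile) + '\n')
--         else:
--             p5Rows.append(FOUR_SPACES + createScriptTag(jsFile) + '\n')
--
--     allRows = []
--     [allRows.append(row) for row in htmlContent]
--     [allRows.append(row) for row in rows]
--     allRows.append(EMPTY_STRING + '\n')
--     [allRows.append(row) for row in p5Rows]
--
--     allRows.append('</body>\n')
--     allRows.append('\n')
--     allRows.append('</html>\n')
--
--     return ''.join(allRows)
--
-- def createScriptTag(path):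
--     return SCRIPT_TAG_TEMPLATE.replace(SRC, path)
-- ===== SOURCE B (Python) =====
-- def _tag(path):
--     return f'    <script type="text/javascript" src="{path}"></script>\n'
--
-- def _dirOf(f):
--     return f.split('/')[2]
--
-- def _groups(files):
--     if not files:
--         return []
--     d = _dirOf(files[0])
--     i = 1
--     while i < len(files) and _dirOf(files[i]) == d:
--         i += 1
--     return [(d, files[:i])] + _groups(files[i:])
--
-- def getFullHtmlContent(htmlContent, jsFiles):
--     rows = []
--     p5Rows = []
--     for _, group in _groups(jsFiles):
--         rows.append('\n')
--         for f in group: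
--             (p5Rows if 'p5' in f else rows).append(_tag(f))
--     return (''.join(htmlContent) + ''.join(rows) + '\n'
--             + ''.join(p5Rows) + '</body>\n\n</html>\n')
-- ===== Notes on version B (the rewrite author's own statement) =====
-- stated objective: alternative
-- what changed: B groups consecutive jsFiles by their directory (path part 2) with a recursive run-splitting helper and renders one blank line before every group, instead of A's per-element lastDir state machine; B assembles the result by concatenating joined segments and builds the script tag by f-string interpolation instead of template .replace.
-- intended difference: When the first jsFile's path part 2 is the empty string, A's lastDir sentinel '' accidentally coincides with that directory and A omits the blank separator line before the first group, while B emits a blank line before every group as intended; elsewhere they agree. — e.g. on getFullHtmlContent(["<html>\n"], ["a/b//x.js"]): A returns "<html>\n <script type=\"text/javascript\" src=\"a/b//x.js\"></script>\n\n</body>\n\n</html>\n", B returns "<html>\n\n <script type=\"text/javascript\" src=\"a/b//x.js\"></script>\n\n</body>\n\n</html>\n"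
-- outside the precondition, e.g. on getFullHtmlContent([], ['app.js']): A raises IndexError, B raises IndexError
import Mathlib
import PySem

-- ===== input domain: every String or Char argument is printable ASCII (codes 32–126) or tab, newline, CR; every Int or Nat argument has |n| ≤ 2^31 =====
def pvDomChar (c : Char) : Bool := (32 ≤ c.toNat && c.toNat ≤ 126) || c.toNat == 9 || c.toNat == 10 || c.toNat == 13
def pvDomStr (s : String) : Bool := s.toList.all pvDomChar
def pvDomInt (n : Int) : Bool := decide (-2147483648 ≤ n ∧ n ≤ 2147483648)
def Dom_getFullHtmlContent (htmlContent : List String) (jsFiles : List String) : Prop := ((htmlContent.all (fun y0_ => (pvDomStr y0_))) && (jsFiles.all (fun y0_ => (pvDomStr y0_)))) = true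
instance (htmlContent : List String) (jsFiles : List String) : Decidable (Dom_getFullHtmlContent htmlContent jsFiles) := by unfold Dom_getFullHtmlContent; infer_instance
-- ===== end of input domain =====

-- B groups consecutive files by directory and emits one blank separator line before every group,
-- instead of A's per-file lastDir state machine; same cost (objective: alternative decomposition).

-- ===== PORT A =====
-- SCRIPT_TAG_TEMPLATE / createScriptTag as in the Python
def createScriptTag (path : String) : String :=
  PySem.Str.replace "<script type=\"text/javascript\" src=\"$src\"></script>" "$src" path

-- loop body of A's for-loop, state = (lastDir, rows, p5Rows); jsFile.split('/')[2] raises on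
-- short paths (excluded by Pre_), ported as pyGet? with getD "" outside that domain
def pvStepA (st : String × List String × List String) (jsFile : String) :
    String × List String × List String :=
  let directory := (PySem.List.pyGet? ((PySem.Str.split? jsFile "/").getD []) 2).getD ""
  let rows := if directory ≠ st.1 then st.2.1 ++ ["\n"] else st.2.1
  if PySem.Str.isIn "p5" jsFile = false then
    (directory, rows ++ ["    " ++ createScriptTag jsFile ++ "\n"], st.2.2)
  else
    (directory, rows, st.2.2 ++ ["    " ++ createScriptTag jsFile ++ "\n"])

def getFullHtmlContent (htmlContent : List String) (jsFiles : List String) : String :=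
  let st := jsFiles.foldl pvStepA ("", [], [])
  let allRows := htmlContent ++ st.2.1 ++ ["\n"] ++ st.2.2 ++ ["</body>\n", "\n", "</html>\n"]
  PySem.Str.join "" allRows

-- ===== PORT B =====
-- _tag of Source B (f-string)
def pvTagB (path : String) : String :=
  "    <script type=\"text/javascript\" src=\"" ++ path ++ "\"></script>\n"

-- _dirOf of Source B
def pvDirB (f : String) : String :=
  (PySem.List.pyGet? ((PySem.Str.split? f "/").getD []) 2).getD ""

-- _groups of Source B: maximal runs of consecutive files sharing a directory
def pvGroups : List String → List (String × List String)
  | [] => []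
  | f :: rest =>
    let d := pvDirB f
    (d, f :: rest.takeWhile (fun x => pvDirB x == d)) ::
      pvGroups (rest.dropWhile (fun x => pvDirB x == d))
  termination_by l => l.length
  decreasing_by simpa using Nat.lt_succ_of_le (List.length_dropWhile_le _ _)

-- body of Source B's outer for-loop, state = (rows, p5Rows)
def pvStepB (st : List String × List String) (g : String × List String) :
    List String × List String :=
  g.2.foldl
    (fun (rp : List String × List String) f =>
      if PySem.Str.isIn "p5" f then (rp.1, rp.2 ++ [pvTagB f])
      else (rp.1 ++ [pvTagB f], rp.2))
    (st.1 ++ ["\n"], st.2)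

def getFullHtmlContent_alt (htmlContent : List String) (jsFiles : List String) : String :=
  let st := (pvGroups jsFiles).foldl pvStepB ([], [])
  PySem.Str.join "" htmlContent ++ PySem.Str.join "" st.1 ++ "\n" ++
    PySem.Str.join "" st.2 ++ "</body>\n\n</html>\n"

-- ===== PRECONDITION & SPEC =====
-- Pre_ excludes inputs where some jsFile has fewer than two '/', on which A's split('/')[2]
-- raises IndexError (B raises there too).
def Pre_getFullHtmlContent (htmlContent : List String) (jsFiles : List String) : Prop :=
  ∀ f ∈ jsFiles, 2 < ((PySem.Str.split? f "/").getD []).length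

instance (htmlContent : List String) (jsFiles : List String) :
    Decidable (Pre_getFullHtmlContent htmlContent jsFiles) := by
  unfold Pre_getFullHtmlContent; infer_instance

def pvWitness_getFullHtmlContent : List String × List String :=
  (["<html>\n", "<body>\n"], ["/static/js/app.js", "/static/js/p5.min.js", "/static/ui/menu.js"])

-- When the first jsFile's path part 2 is the empty string, A's lastDir sentinel '' accidentally
-- coincides with that directory and A omits the blank separator line before the first group,
-- while B emits a blank line before every group as intended; elsewhere they agree.
def D_getFullHtmlContent (htmlContent : List String) (jsFiles : List String) : Prop :=
  jsFiles ≠ [] ∧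
    PySem.List.pyGet? ((PySem.Str.split? (jsFiles.headD "") "/").getD []) 2 = some ""

instance (htmlContent : List String) (jsFiles : List String) :
    Decidable (D_getFullHtmlContent htmlContent jsFiles) := by
  unfold D_getFullHtmlContent; infer_instance

def Spec_getFullHtmlContent (htmlContent : List String) (jsFiles : List String) (out : String) : Prop :=
  ¬ D_getFullHtmlContent htmlContent jsFiles → out = getFullHtmlContent_alt htmlContent jsFiles
instance (htmlContent : List String) (jsFiles : List String) (out : String) :
    Decidable (Spec_getFullHtmlContent htmlContent jsFiles out) := by
  unfold Spec_getFullHtmlContent; infer_instance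

def pvDiffWitness_getFullHtmlContent : List String × List String :=
  (["<html>\n"], ["a/b//x.js"])

def pvDiffWitnessOut_getFullHtmlContent : String × String :=
  ("<html>\n    <script type=\"text/javascript\" src=\"a/b//x.js\"></script>\n\n</body>\n\n</html>\n",
   "<html>\n\n    <script type=\"text/javascript\" src=\"a/b//x.js\"></script>\n\n</body>\n\n</html>\n")

-- ===== CLAIM (what is proved, stated in full; the proofs are below) =====
def Claim_unchanged_getFullHtmlContent : Prop := ∀ (htmlContent : List String) (jsFiles : List String), Dom_getFullHtmlContent htmlContent jsFiles → Pre_getFullHtmlContent htmlContent jsFiles → Spec_getFullHtmlContent htmlContent jsFiles (getFullHtmlContent htmlContent jsFiles)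
def Claim_changed_getFullHtmlContent : Prop := Dom_getFullHtmlContent (pvDiffWitness_getFullHtmlContent.1) (pvDiffWitness_getFullHtmlContent.2) ∧ Pre_getFullHtmlContent (pvDiffWitness_getFullHtmlContent.1) (pvDiffWitness_getFullHtmlContent.2) ∧ D_getFullHtmlContent (pvDiffWitness_getFullHtmlContent.1) (pvDiffWitness_getFullHtmlContent.2) ∧ getFullHtmlContent (pvDiffWitness_getFullHtmlContent.1) (pvDiffWitness_getFullHtmlContent.2) = pvDiffWitnessOut_getFullHtmlContent.1 ∧ getFullHtmlContent_alt (pvDiffWitness_getFullHtmlContent.1) (pvDiffWitness_getFullHtmlContent.2) = pvDiffWitnessOut_getFullHtmlContent.2 ∧ pvDiffWitnessOut_getFullHtmlContent.1 ≠ pvDiffWitnessOut_getFullHtmlContent.2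
def Claim_exact_getFullHtmlContent : Prop := ∀ (htmlContent : List String) (jsFiles : List String), Dom_getFullHtmlContent htmlContent jsFiles → Pre_getFullHtmlContent htmlContent jsFiles → D_getFullHtmlContent htmlContent jsFiles → getFullHtmlContent htmlContent jsFiles ≠ getFullHtmlContent_alt htmlContent jsFiles

-- ===== LEMMAS AND PROOFS =====

-- join with empty separator distributes over cons/append
theorem pv_flat_int (l : List (List Char)) :
    (List.intersperse ([] : List Char) l).flatten = l.flatten := by
  induction l with
  | nil => rfl
  | cons a t ih =>
    cases t with
    | nil => rfl
    | cons b t2 => simp_all [List.intersperse]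

theorem pv_join_nil : PySem.Str.join "" [] = "" := rfl

theorem pv_join_cons (x : String) (ys : List String) :
    PySem.Str.join "" (x :: ys) = x ++ PySem.Str.join "" ys := by
  simp [PySem.Str.join, PySem.Chars.join, List.intercalate, pv_flat_int]

theorem pv_join_append (xs ys : List String) :
    PySem.Str.join "" (xs ++ ys) = PySem.Str.join "" xs ++ PySem.Str.join "" ys := by
  induction xs with
  | nil => simp [pv_join_nil]
  | cons a t ih => simp [pv_join_cons, ih, String.append_assoc]

-- A's tag expression equals B's tag
theorem pv_tag_eq (f : String) : "    " ++ createScriptTag f ++ "\n" = pvTagB f := by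
  simp [createScriptTag, pvTagB, PySem.Str.replace, PySem.Chars.replace, PySem.Chars.replace.go,
    ← String.toList_inj]

-- the tag rows a list of files contributes, split into non-p5 and p5 rows
def pvNon (g : List String) : List String :=
  (g.filter (fun f => !PySem.Str.isIn "p5" f)).map pvTagB
def pvP5 (g : List String) : List String :=
  (g.filter (fun f => PySem.Str.isIn "p5" f)).map pvTagB

-- the (rows, p5Rows) A's loop generates from a given lastDir
def pvGenA : String → List String → List String × List String
  | _, [] => ([], [])
  | last, f :: fs =>
    let d := pvDirB f
    let rp := pvGenA d fs
    let blank := if d ≠ last then ["\n"] else []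
    if PySem.Str.isIn "p5" f then (blank ++ rp.1, pvTagB f :: rp.2)
    else (blank ++ pvTagB f :: rp.1, rp.2)

def pvNonOne (x : String) : List String := if PySem.Str.isIn "p5" x then [] else [pvTagB x]
def pvP5One (x : String) : List String := if PySem.Str.isIn "p5" x then [pvTagB x] else []

theorem pvNon_cons (x : String) (l : List String) : pvNon (x :: l) = pvNonOne x ++ pvNon l := by
  simp only [pvNon, pvNonOne, List.filter_cons]
  cases hp : PySem.Str.isIn "p5" x <;> simp only [PySem.Str.isIn_eq] at hp <;> simp [hp]

theorem pvP5_cons (x : String) (l : List String) : pvP5 (x :: l) = pvP5One x ++ pvP5 l := by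
  simp only [pvP5, pvP5One, List.filter_cons]
  cases hp : PySem.Str.isIn "p5" x <;> simp only [PySem.Str.isIn_eq] at hp <;> simp [hp]

theorem pv_foldA (fs : List String) : ∀ (last : String) (rows p5 : List String),
    ((fs.foldl pvStepA (last, rows, p5)).2.1 = rows ++ (pvGenA last fs).1 ∧
     (fs.foldl pvStepA (last, rows, p5)).2.2 = p5 ++ (pvGenA last fs).2) := by
  induction fs with
  | nil => intro last rows p5; simp [pvGenA]
  | cons f fs ih =>
    intro last rows p5
    cases hp : PySem.Str.isIn "p5" f with
    | true =>
      simp only [List.foldl_cons, pvStepA, hp, Bool.true_eq_false, if_false]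
      refine ⟨?_, ?_⟩
      · rw [(ih _ _ _).1]
        simp only [pvGenA, pvDirB, hp]
        split_ifs <;> simp_all
      · rw [(ih _ _ _).2]
        simp only [pvGenA, pvDirB, hp, pv_tag_eq]
        split_ifs <;> simp_all
    | false =>
      simp only [List.foldl_cons, pvStepA, hp, if_true]
      refine ⟨?_, ?_⟩
      · rw [(ih _ _ _).1]
        simp only [pvGenA, pvDirB, hp, Bool.false_eq_true, if_false, pv_tag_eq]
        split_ifs <;> simp_all
      · rw [(ih _ _ _).2]
        simp only [pvGenA, pvDirB, hp, Bool.false_eq_true, if_false]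

-- A's generator, one step
theorem pv_genA_cons (last f : String) (fs : List String) :
    pvGenA last (f :: fs) =
      ((if pvDirB f ≠ last then ["\n"] else []) ++ pvNonOne f ++ (pvGenA (pvDirB f) fs).1,
       pvP5One f ++ (pvGenA (pvDirB f) fs).2) := by
  simp only [pvGenA, pvNonOne, pvP5One]
  cases hp : PySem.Str.isIn "p5" f <;> simp only [PySem.Str.isIn_eq] at hp <;>
    simp [List.append_assoc]

-- A's generator over a run of files all in directory d
theorem pv_genA_run (g : List String) : ∀ (fs : List String) (d : String),
    (∀ x ∈ g, pvDirB x = d) →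
    pvGenA d (g ++ fs) = (pvNon g ++ (pvGenA d fs).1, pvP5 g ++ (pvGenA d fs).2) := by
  induction g with
  | nil => intro fs d _; simp [pvNon, pvP5]
  | cons a t ih =>
    intro fs d hall
    have ha : pvDirB a = d := hall a (by simp)
    have ht : ∀ x ∈ t, pvDirB x = d := fun x hx => hall x (by simp [hx])
    rw [List.cons_append, pv_genA_cons, ha, ih fs d ht, pvNon_cons, pvP5_cons]
    simp [List.append_assoc]

-- rendering of the group list with A's lastDir rule
def pvRend : String → List (String × List String) → List String × List String
  | _, [] => ([], [])
  | last, (d, g) :: gs =>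
    let rp := pvRend d gs
    ((if d ≠ last then ["\n"] else []) ++ pvNon g ++ rp.1, pvP5 g ++ rp.2)

-- rendering of the group list with B's rule: a blank line before every group
def pvRendB : List (String × List String) → List String × List String
  | [] => ([], [])
  | (_, g) :: gs =>
    let rp := pvRendB gs
    ("\n" :: (pvNon g ++ rp.1), pvP5 g ++ rp.2)

theorem pv_groups_cons (f : String) (rest : List String) :
    pvGroups (f :: rest) =
      (pvDirB f, f :: rest.takeWhile (fun x => pvDirB x == pvDirB f)) ::
        pvGroups (rest.dropWhile (fun x => pvDirB x == pvDirB f)) := by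
  rw [pvGroups]

theorem pv_genA_groups (fs : List String) : ∀ (last : String),
    pvGenA last fs = pvRend last (pvGroups fs) := by
  induction fs using pvGroups.induct with
  | case1 => intro last; simp [pvGenA, pvGroups, pvRend]
  | case2 f rest _d ih =>
    intro last
    have hmem : ∀ x ∈ rest.takeWhile (fun x => pvDirB x == pvDirB f), pvDirB x = pvDirB f := by
      intro x hx
      simpa using List.mem_takeWhile_imp hx
    have htail : pvGenA (pvDirB f) rest =
        (pvNon (rest.takeWhile (fun x => pvDirB x == pvDirB f)) ++
          (pvRend (pvDirB f) (pvGroups (rest.dropWhile (fun x => pvDirB x == pvDirB f)))).1,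
         pvP5 (rest.takeWhile (fun x => pvDirB x == pvDirB f)) ++
          (pvRend (pvDirB f) (pvGroups (rest.dropWhile (fun x => pvDirB x == pvDirB f)))).2) := by
      conv_lhs => rw [show rest = rest.takeWhile (fun x => pvDirB x == pvDirB f) ++
        rest.dropWhile (fun x => pvDirB x == pvDirB f) from (List.takeWhile_append_dropWhile).symm]
      rw [pv_genA_run _ _ _ hmem, ih (pvDirB f)]
    rw [pv_groups_cons, pv_genA_cons, htail]
    simp only [pvRend, pvNon_cons, pvP5_cons]
    simp [List.append_assoc]

theorem pv_dropWhile_head {α : Type} (p : α → Bool) (l : List α) (x : α) (xs : List α)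
    (h : l.dropWhile p = x :: xs) : p x = false := by
  induction l with
  | nil => simp [List.dropWhile] at h
  | cons a t ih =>
    rw [List.dropWhile_cons] at h
    by_cases ha : p a = true
    · rw [if_pos ha] at h; exact ih h
    · rw [if_neg ha] at h
      cases h
      revert ha; cases p x <;> simp

-- A's lastDir rendering equals B's always-blank rendering when the first group's
-- directory differs from lastDir (consecutive groups always have distinct directories)
theorem pv_rend_eq_rendB (fs : List String) : ∀ (last : String),
    (∀ x xs, fs = x :: xs → pvDirB x ≠ last) →
    pvRend last (pvGroups fs) = pvRendB (pvGroups fs) := by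
  induction fs using pvGroups.induct with
  | case1 => intro last _; simp [pvGroups, pvRend, pvRendB]
  | case2 f rest _d ih =>
    intro last hcond
    rw [pv_groups_cons]
    have hne : pvDirB f ≠ last := hcond f rest rfl
    have htail : pvRend (pvDirB f) (pvGroups (rest.dropWhile (fun x => pvDirB x == pvDirB f))) =
        pvRendB (pvGroups (rest.dropWhile (fun x => pvDirB x == pvDirB f))) := by
      apply ih
      intro x xs hx
      have hpx := pv_dropWhile_head (fun y => pvDirB y == pvDirB f) rest x xs hx
      simpa using hpx
    simp only [pvRend, pvRendB, htail]
    simp [hne]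

-- B's inner per-group fold
theorem pv_foldB_inner (g : List String) : ∀ (rows p5 : List String),
    g.foldl (fun (rp : List String × List String) f =>
        if PySem.Str.isIn "p5" f then (rp.1, rp.2 ++ [pvTagB f]) else (rp.1 ++ [pvTagB f], rp.2))
      (rows, p5) = (rows ++ pvNon g, p5 ++ pvP5 g) := by
  induction g with
  | nil => intro rows p5; simp [pvNon, pvP5]
  | cons a t ih =>
    intro rows p5
    simp only [List.foldl_cons]
    cases hp : PySem.Str.isIn "p5" a with
    | true =>
      rw [if_pos rfl, ih, pvNon_cons, pvP5_cons]
      simp only [PySem.Str.isIn_eq] at hp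
      have hp' : PySem.Chars.isIn ['p', '5'] a.toList = true := hp
      simp [pvNonOne, pvP5One, hp', List.append_assoc]
    | false =>
      rw [if_neg (by simp), ih, pvNon_cons, pvP5_cons]
      simp only [PySem.Str.isIn_eq] at hp
      have hp' : PySem.Chars.isIn ['p', '5'] a.toList = false := hp
      simp [pvNonOne, pvP5One, hp', List.append_assoc]

-- B's outer fold over the groups
theorem pv_foldB (gs : List (String × List String)) : ∀ (rows p5 : List String),
    (gs.foldl pvStepB (rows, p5)).1 = rows ++ (pvRendB gs).1 ∧
    (gs.foldl pvStepB (rows, p5)).2 = p5 ++ (pvRendB gs).2 := by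
  induction gs with
  | nil => intro rows p5; simp [pvRendB]
  | cons hdg t ih =>
    intro rows p5
    obtain ⟨d, g⟩ := hdg
    have hF : pvStepB (rows, p5) (d, g) = ((rows ++ ["\n"]) ++ pvNon g, p5 ++ pvP5 g) := by
      simp only [pvStepB, pv_foldB_inner]
    rw [List.foldl_cons, hF]
    have h1 := ih ((rows ++ ["\n"]) ++ pvNon g) (p5 ++ pvP5 g)
    refine ⟨?_, ?_⟩
    · rw [h1.1]; simp only [pvRendB]; simp
    · rw [h1.2]; simp only [pvRendB]; simp

-- inside Pre_, a file's directory lookup succeeds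
theorem pv_dir_some (f : String) (h : 2 < ((PySem.Str.split? f "/").getD []).length) :
    PySem.List.pyGet? ((PySem.Str.split? f "/").getD []) 2 =
      some (((PySem.Str.split? f "/").getD [])[2]'h) := by
  exact PySem.List.pyGet?_ofNat _ _ h

-- inside D_ (with Pre_), B's first-group rendering has one extra blank line over A's
theorem pv_D_shift (f : String) (rest : List String) (hd : pvDirB f = "") :
    (pvRendB (pvGroups (f :: rest))).1 = "\n" :: (pvRend "" (pvGroups (f :: rest))).1 ∧
    (pvRendB (pvGroups (f :: rest))).2 = (pvRend "" (pvGroups (f :: rest))).2 := by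
  rw [pv_groups_cons]
  have htail : pvRend (pvDirB f) (pvGroups (rest.dropWhile (fun x => pvDirB x == pvDirB f))) =
      pvRendB (pvGroups (rest.dropWhile (fun x => pvDirB x == pvDirB f))) := by
    apply pv_rend_eq_rendB
    intro x xs hx
    have hpx := pv_dropWhile_head (fun y => pvDirB y == pvDirB f) rest x xs hx
    simpa using hpx
  rw [hd] at htail ⊢
  constructor <;> simp [pvRend, pvRendB, htail]

-- the two full outputs, expressed through the renderings
theorem pv_out_A (htmlContent jsFiles : List String) :
    getFullHtmlContent htmlContent jsFiles =
      PySem.Str.join "" htmlContent ++ PySem.Str.join "" (pvRend "" (pvGroups jsFiles)).1 ++ "\n" ++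
        PySem.Str.join "" (pvRend "" (pvGroups jsFiles)).2 ++ "</body>\n\n</html>\n" := by
  have hA := pv_foldA jsFiles "" [] []
  unfold getFullHtmlContent
  dsimp only
  simp only [List.nil_append] at hA
  rw [hA.1, hA.2, pv_genA_groups]
  rw [pv_join_append, pv_join_append, pv_join_append, pv_join_append]
  simp only [pv_join_cons, pv_join_nil]
  simp [String.append_assoc]

theorem pv_out_B (htmlContent jsFiles : List String) :
    getFullHtmlContent_alt htmlContent jsFiles =
      PySem.Str.join "" htmlContent ++ PySem.Str.join "" (pvRendB (pvGroups jsFiles)).1 ++ "\n" ++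
        PySem.Str.join "" (pvRendB (pvGroups jsFiles)).2 ++ "</body>\n\n</html>\n" := by
  have hB := pv_foldB (pvGroups jsFiles) [] []
  unfold getFullHtmlContent_alt
  dsimp only
  simp only [List.nil_append] at hB
  rw [hB.1, hB.2]

-- ===== VERDICT (by name: the statements are the Claim_ definitions above) =====
theorem getFullHtmlContent_spec : Claim_unchanged_getFullHtmlContent := by
  intro htmlContent jsFiles _ hpre hnD
  show getFullHtmlContent htmlContent jsFiles = getFullHtmlContent_alt htmlContent jsFiles
  rw [pv_out_A, pv_out_B]
  have hEq : pvRend "" (pvGroups jsFiles) = pvRendB (pvGroups jsFiles) := by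
    apply pv_rend_eq_rendB
    intro x xs hx
    subst hx
    have hlen := hpre x (by simp)
    have hsome := pv_dir_some x hlen
    intro hcontra
    have hv : ((PySem.Str.split? x "/").getD [])[2]'hlen = "" := by
      simpa [pvDirB, hsome] using hcontra
    exact hnD ⟨by simp, by simp only [List.headD_cons]; rw [hsome, hv]⟩
  rw [hEq]

theorem getFullHtmlContent_changed : Claim_changed_getFullHtmlContent := by
  unfold Claim_changed_getFullHtmlContent
  have hgroups : pvGroups ["a/b//x.js"] = [("", ["a/b//x.js"])] := by
    rw [pv_groups_cons]
    simp [pvGroups, show pvDirB "a/b//x.js" = "" from by decide]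
  refine ⟨by decide, by decide, by decide, ?_, ?_, by decide⟩
  · rw [show pvDiffWitness_getFullHtmlContent =
      (["<html>\n"], ["a/b//x.js"]) from rfl, pv_out_A, hgroups]
    decide
  · rw [show pvDiffWitness_getFullHtmlContent =
      (["<html>\n"], ["a/b//x.js"]) from rfl, pv_out_B, hgroups]
    decide

theorem getFullHtmlContent_tight : Claim_exact_getFullHtmlContent := by
  intro htmlContent jsFiles _ _ hD
  obtain ⟨hne, hget⟩ := hD
  obtain ⟨f, rest, rfl⟩ := List.exists_cons_of_ne_nil hne
  have hd : pvDirB f = "" := by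
    simp only [List.headD_cons] at hget
    simp [pvDirB, hget]
  rw [pv_out_A, pv_out_B]
  obtain ⟨h1, h2⟩ := pv_D_shift f rest hd
  rw [h1, h2, pv_join_cons]
  intro h
  have := congrArg String.length h
  have h1len : ("\n" : String).length = 1 := rfl
  simp only [String.length_append, h1len] at this
  omega
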